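-- pv_equiv track=rewrite | github.com/jhhb/programminglanguages | lexical_analyzer_and_recursive_descent_parser/lexical.py | isCharLiteral
-- ===== SOURCE A (Python) =====
-- import string
--
-- def isCharLiteral(lexeme):
--
--
--     printable = string.printable
--
--     for z in range (0, len(printable)):
--         temp = "'"+printable[z]+"'"
--
--         if temp == lexeme:
--             return True
--
--     if lexeme == "''":
--         return True
--
--     return False
-- ===== SOURCE B (Python) =====
-- import string
--
-- def isCharLiteral(lexeme):
--     if not isinstance(lexeme, str):
--         return False
--     if lexeme == "''":
--         return True
--     return len(lexeme) == 3 and lexeme[0] == "'" and lexeme[2] == "'" and lexeme[1] in string.printable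
-- ===== Notes on version B (the rewrite author's own statement) =====
-- stated objective: simpler
-- what changed: Replaced the loop that builds all 100 candidate quoted strings from string.printable with a direct structural test: length 3, quote delimiters, and a printable middle character (or the empty literal "''").
import Mathlib
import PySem

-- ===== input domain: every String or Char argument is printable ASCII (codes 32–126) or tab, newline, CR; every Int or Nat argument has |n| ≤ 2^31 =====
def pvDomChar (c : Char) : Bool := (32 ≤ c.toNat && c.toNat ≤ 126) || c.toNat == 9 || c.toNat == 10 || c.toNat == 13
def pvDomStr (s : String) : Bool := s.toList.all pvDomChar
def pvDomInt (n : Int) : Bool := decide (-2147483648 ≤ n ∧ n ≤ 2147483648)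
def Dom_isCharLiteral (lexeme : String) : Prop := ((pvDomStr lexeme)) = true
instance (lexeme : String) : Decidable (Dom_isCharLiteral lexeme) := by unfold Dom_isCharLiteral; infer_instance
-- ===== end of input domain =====

-- B replaces A's loop over the 100 printable characters by a direct structural test (simpler, no loop).

-- string.printable, in CPython's order (digits, lowercase, uppercase, punctuation, whitespace)
def pyPrintable : List Char :=
  "0123456789abcdefghijklmnopqrstuvwxyzABCDEFGHIJKLMNOPQRSTUVWXYZ!\"#$%&'()*+,-./:;<=>?@[\\]^_`{|}~ \t\n\r\x0b\x0c".toList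

-- ===== PORT A =====
-- A's for-loop over range(0, len(printable)): structural recursion over the characters in order;
-- falling out of the loop performs the final lexeme == "''" check.
def isCharLiteralLoop (lexeme : String) : List Char → Bool
  | [] => if lexeme == "''" then true else false
  | c :: rest =>
      let temp := "'" ++ String.singleton c ++ "'"
      if temp == lexeme then true else isCharLiteralLoop lexeme rest

def isCharLiteral (lexeme : String) : Bool := isCharLiteralLoop lexeme pyPrintable

-- ===== PORT B =====
-- direct structural test: "''", or exactly three chars quote/printable/quote
def isCharLiteral_alt (lexeme : String) : Bool :=
  if lexeme == "''" then true
  else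
    match lexeme.toList with
    | [a, m, b] => a == '\'' && b == '\'' && pyPrintable.contains m
    | _ => false

-- ===== PRECONDITION & SPEC =====
def Spec_isCharLiteral (lexeme : String) (out : Bool) : Prop := out = isCharLiteral_alt lexeme
instance (lexeme : String) (out : Bool) : Decidable (Spec_isCharLiteral lexeme out) := by unfold Spec_isCharLiteral; infer_instance

-- ===== CLAIM (what is proved, stated in full; the proofs are below) =====
def Claim_equal_isCharLiteral : Prop := ∀ (lexeme : String), Dom_isCharLiteral lexeme → Spec_isCharLiteral lexeme (isCharLiteral lexeme)

-- ===== LEMMAS AND PROOFS =====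

-- A's loop returns true iff some printable c makes "'c'" equal to lexeme, else falls through to the "''" test
theorem loop_eq_any (lexeme : String) (l : List Char) :
    isCharLiteralLoop lexeme l
      = (l.any (fun c => decide ("'" ++ String.singleton c ++ "'" = lexeme)) || decide (lexeme = "''")) := by
  induction l with
  | nil =>
    simp only [isCharLiteralLoop, List.any_nil, Bool.false_or]
    by_cases h : lexeme = "''" <;> simp [h]
  | cons c rest ih =>
    simp only [isCharLiteralLoop, List.any_cons, ih]
    by_cases h : ("'" ++ String.singleton c ++ "'" = lexeme) <;> simp [Bool.or_assoc]

theorem quoted_eq_iff (c : Char) (lexeme : String) :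
    ("'".push c ++ "'" = lexeme) ↔ lexeme.toList = ['\'', c, '\''] := by
  constructor
  · rintro rfl; simp
  · intro h
    have h2 : ("'".push c ++ "'").toList = lexeme.toList := by simp [h]
    exact String.toList_inj.mp h2

theorem quoted_eq_iff' (c : Char) (lexeme : String) :
    ("'" ++ String.singleton c ++ "'" = lexeme) ↔ lexeme.toList = ['\'', c, '\''] := by
  rw [← quoted_eq_iff]
  constructor <;> intro h <;> [skip; skip] <;>
    · rw [← h]; apply String.toList_inj.mp; simp

theorem isCharLiteral_eq (lexeme : String) : isCharLiteral lexeme = isCharLiteral_alt lexeme := by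
  unfold isCharLiteral isCharLiteral_alt
  rw [loop_eq_any]
  by_cases h2 : lexeme = "''"
  · simp [h2]
  · rw [if_neg (by simpa using h2)]
    simp only [decide_eq_false h2, Bool.or_false]
    rcases hL : lexeme.toList with _ | ⟨a, _ | ⟨m, _ | ⟨b, _ | ⟨d, rest⟩⟩⟩⟩
    · simp [quoted_eq_iff, hL]
    · simp [quoted_eq_iff, hL]
    · simp [quoted_eq_iff, hL]
    · rw [Bool.eq_iff_iff]
      simp only [List.any_eq_true, decide_eq_true_eq, quoted_eq_iff', hL, List.cons.injEq,
        and_true, Bool.and_eq_true, beq_iff_eq, List.contains_iff_exists_mem_beq]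
      constructor
      · rintro ⟨x, hx, ha, hm, hb⟩; exact ⟨⟨ha, hb⟩, x, hx, hm⟩
      · rintro ⟨⟨ha, hb⟩, x, hx, hm⟩; exact ⟨x, hx, ha, hm, hb⟩
    · simp [quoted_eq_iff, hL]

-- ===== VERDICT (by name: the statement is the Claim_ definition above) =====
theorem isCharLiteral_spec : Claim_equal_isCharLiteral := by
  intro lexeme _
  unfold Spec_isCharLiteral
  exact isCharLiteral_eq lexeme
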